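-- pv_equiv track=rewrite | github.com/thaReal/MasterChef | codeforces/round_653/twosix.py | solve
-- ===== SOURCE A (Python) =====
-- def solve(n):
-- 	if n == 1:
-- 		return 0
--
-- 	moves = 0
-- 	while n != 1:
-- 		if n % 6 == 0:
-- 			n //= 6
-- 			moves += 1
--
-- 		elif (n * 2) % 6 == 0:
-- 			n *= 2
-- 			moves += 1
--
-- 		else:
-- 			break
--
-- 	if n != 1:
-- 		return -1
-- 	else:
-- 		return moves
-- ===== SOURCE B (Python) =====
-- def solve(n):
--     cnt2 = 0
--     while n % 2 == 0:
--         n //= 2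
--         cnt2 += 1
--     cnt3 = 0
--     while n % 3 == 0:
--         n //= 3
--         cnt3 += 1
--     if n != 1 or cnt3 < cnt2:
--         return -1
--     return 2 * cnt3 - cnt2
-- ===== Notes on version B (the rewrite author's own statement) =====
-- stated objective: simpler
-- what changed: Replaces the greedy divide-by-6 / multiply-by-2 simulation with a closed form: strip factors of 2 and 3, then return 2*cnt3-cnt2 if the residual is 1 and cnt3>=cnt2, else -1.
import Mathlib
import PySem

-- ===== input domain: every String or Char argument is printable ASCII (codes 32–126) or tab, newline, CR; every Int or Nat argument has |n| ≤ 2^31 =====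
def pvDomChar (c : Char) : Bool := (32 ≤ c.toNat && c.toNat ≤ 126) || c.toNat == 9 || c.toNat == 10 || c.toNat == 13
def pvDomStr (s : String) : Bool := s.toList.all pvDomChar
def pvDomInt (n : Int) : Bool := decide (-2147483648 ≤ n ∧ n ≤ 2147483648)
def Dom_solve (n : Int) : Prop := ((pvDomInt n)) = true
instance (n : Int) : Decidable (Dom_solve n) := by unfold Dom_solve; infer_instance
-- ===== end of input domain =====

-- B replaces A's greedy ×2 / ÷6 simulation by the closed form over the factorization
-- (strip 2s, strip 3s, then a formula); objective: simpler.

-- ===== PORT A =====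
-- A's while loop, ported with a fuel parameter that only makes it total
-- (2*|n|+2 steps always suffice for n ≠ 0; n = 0 — where Python A diverges — is outside Pre_).
def solveLoop : Nat → Int → Int → Int
  | 0, _, _ => -1
  | f + 1, n, moves =>
    if n = 1 then moves
    else if PySem.Int.mod n 6 = 0 then solveLoop f (PySem.Int.floordiv n 6) (moves + 1)
    else if PySem.Int.mod (n * 2) 6 = 0 then solveLoop f (n * 2) (moves + 1)
    else -1  -- break with n ≠ 1, then the final `if n != 1: return -1`

def solve (n : Int) : Int :=
  if n = 1 then 0
  else solveLoop (2 * n.natAbs + 2) n 0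

-- ===== PORT B =====
-- `while n % p == 0: n //= p; cnt += 1`, fuel |n| suffices (and at fuel 0 the junk value
-- coincides with the loop's answer whenever p no longer divides n).
def stripLoop (p : Int) : Nat → Int → Int → Int × Int
  | 0, n, c => (n, c)
  | f + 1, n, c =>
    if PySem.Int.mod n p = 0 then stripLoop p f (PySem.Int.floordiv n p) (c + 1)
    else (n, c)

def solve_alt (n : Int) : Int :=
  let r2 := stripLoop 2 n.natAbs n 0
  let r3 := stripLoop 3 n.natAbs r2.1 0
  if r3.1 ≠ 1 ∨ r3.2 < r2.2 then -1
  else 2 * r3.2 - r2.2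

-- ===== PRECONDITION & SPEC =====
-- Pre_ excludes exactly n = 0, on which Python A loops forever (0 // 6 == 0) and never returns.
def Pre_solve (n : Int) : Prop := n ≠ 0
instance (n : Int) : Decidable (Pre_solve n) := by unfold Pre_solve; infer_instance
def pvWitness_solve : Int := 12

def Spec_solve (n : Int) (out : Int) : Prop := out = solve_alt n
instance (n : Int) (out : Int) : Decidable (Spec_solve n out) := by unfold Spec_solve; infer_instance

-- ===== CLAIM (what is proved, stated in full; the proofs are below) =====
def Claim_equal_solve : Prop := ∀ (n : Int), Dom_solve n → Pre_solve n → Spec_solve n (solve n)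

-- ===== LEMMAS AND PROOFS =====

-- accumulator shift for stripLoop
theorem stripLoop_acc (p : Int) : ∀ (f : Nat) (n c d : Int),
    stripLoop p f n (c + d) = ((stripLoop p f n c).1, (stripLoop p f n c).2 + d) := by
  intro f
  induction f with
  | zero => intro n c d; simp [stripLoop]
  | succ f ih =>
    intro n c d
    simp only [stripLoop]
    split
    · have := ih (PySem.Int.floordiv n p) (c + 1) d
      rw [show c + d + 1 = c + 1 + d by ring, this]
    · simp

-- characterization of stripLoop with sufficient fuel
theorem stripLoop_char (p : Int) (hp : 2 ≤ p) : ∀ (f : Nat) (n : Int), n ≠ 0 → n.natAbs ≤ f →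
    ∃ (k : Nat), stripLoop p f n 0 = ((stripLoop p f n 0).1, (k : Int)) ∧
      n = (stripLoop p f n 0).1 * p ^ k ∧ ¬ (p ∣ (stripLoop p f n 0).1) := by
  intro f
  induction f with
  | zero => intro n hn h; omega
  | succ f ih =>
    intro n hn h
    by_cases hdvd : p ∣ n
    · have hmod : PySem.Int.mod n p = 0 := (PySem.Int.mod_eq_zero_iff_dvd n p).mpr hdvd
      have hfd : PySem.Int.floordiv n p = n / p := PySem.Int.floordiv_eq_ediv_of_pos (by omega)
      have hne : n / p ≠ 0 := by
        intro h0
        have := Int.ediv_mul_cancel hdvd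
        rw [h0] at this; simp at this; omega
      have hlt : (n / p).natAbs < n.natAbs := by
        rcases hdvd with ⟨t, rfl⟩
        rw [Int.mul_ediv_cancel_left _ (by omega : p ≠ 0)]
        have : t ≠ 0 := by rintro rfl; simp at hn
        have h1 : 1 ≤ t.natAbs := by omega
        calc t.natAbs < p.natAbs * t.natAbs := by
              have : 2 ≤ p.natAbs := by omega
              nlinarith
          _ = (p * t).natAbs := (Int.natAbs_mul p t).symm
      obtain ⟨k, hk1, hk2, hk3⟩ := ih (n / p) hne (by omega)
      have hstep : stripLoop p (f + 1) n 0
          = ((stripLoop p f (n/p) 0).1, (stripLoop p f (n/p) 0).2 + 1) := by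
        simp only [stripLoop, hmod, if_pos, hfd]
        exact stripLoop_acc p f (n/p) 0 1
      have hsnd : (stripLoop p f (n/p) 0).2 = (k : Int) := by rw [hk1]
      refine ⟨k + 1, ?_, ?_, ?_⟩
      · rw [hstep, hsnd]; push_cast; ring_nf
      · rw [hstep]
        calc n = (n / p) * p := (Int.ediv_mul_cancel hdvd).symm
          _ = (stripLoop p f (n/p) 0).1 * p ^ k * p := by rw [← hk2]
          _ = (stripLoop p f (n/p) 0).1 * p ^ (k + 1) := by ring
      · rw [hstep]
        simpa using hk3
    · have hmod : PySem.Int.mod n p ≠ 0 := fun h => hdvd ((PySem.Int.mod_eq_zero_iff_dvd n p).mp h)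
      refine ⟨0, ?_, ?_, ?_⟩ <;> simp [stripLoop, hmod, hdvd]

-- existence of the 2-3 decomposition
theorem exists_decomp (n : Int) (hn : n ≠ 0) :
    ∃ (a b : Nat) (r : Int), n = r * 2 ^ a * 3 ^ b ∧ ¬ (2 ∣ r) ∧ ¬ (3 ∣ r) := by
  obtain ⟨a, _, h2, h2d⟩ := stripLoop_char 2 (by norm_num) n.natAbs n hn le_rfl
  set m := (stripLoop 2 n.natAbs n 0).1 with hm
  have hmne : m ≠ 0 := by rintro h0; rw [h0] at h2; simp at h2; exact hn h2
  obtain ⟨b, _, h3, h3d⟩ := stripLoop_char 3 (by norm_num) n.natAbs m hmne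
    (by
      have hdd : m ∣ n := ⟨2 ^ a, h2⟩
      have := Int.natAbs_dvd_natAbs.mpr hdd
      exact Nat.le_of_dvd (by omega) this)
  set s := (stripLoop 3 n.natAbs m 0).1 with hs
  refine ⟨a, b, s, ?_, ?_, h3d⟩
  · rw [h2, h3]; ring
  · intro hdvd
    apply h2d
    rw [h3]
    exact dvd_mul_of_dvd_left hdvd _

-- uniqueness of the decomposition
theorem decomp_unique : ∀ (a b c d : Nat) (r s : Int),
    r * 2 ^ a * 3 ^ b = s * 2 ^ c * 3 ^ d → ¬ (2 ∣ r) → ¬ (3 ∣ r) → ¬ (2 ∣ s) → ¬ (3 ∣ s) →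
    a = c ∧ b = d ∧ r = s := by
  have key2 : ∀ (a c : Nat) (x y : Int), a < c → x * 2 ^ a = y * 2 ^ c → ¬ (2 ∣ x) → False := by
    intro a c x y hac heq hx
    have : x * 2 ^ a = (y * 2 ^ (c - a)) * 2 ^ a := by
      rw [heq, mul_assoc, ← pow_add, Nat.sub_add_cancel (le_of_lt hac)]
    have hx' : x = y * 2 ^ (c - a) := by
      have h2 : (2:Int) ^ a ≠ 0 := by positivity
      exact mul_right_cancel₀ h2 this
    apply hx
    rw [hx']
    exact Dvd.dvd.mul_left (dvd_pow_self 2 (by omega)) y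
  have key3 : ∀ (b d : Nat) (x y : Int), b < d → x * 3 ^ b = y * 3 ^ d → ¬ (3 ∣ x) → False := by
    intro b d x y hbd heq hx
    have : x * 3 ^ b = (y * 3 ^ (d - b)) * 3 ^ b := by
      rw [heq, mul_assoc, ← pow_add, Nat.sub_add_cancel (le_of_lt hbd)]
    have hx' : x = y * 3 ^ (d - b) := by
      have h3 : (3:Int) ^ b ≠ 0 := by positivity
      exact mul_right_cancel₀ h3 this
    apply hx
    rw [hx']
    exact Dvd.dvd.mul_left (dvd_pow_self 3 (by omega)) y
  intro a b c d r s heq h2r h3r h2s h3s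
  have hodd2r : ¬ (2 ∣ r * 3 ^ b) := by
    intro h
    rcases (Int.prime_two.dvd_mul.mp h) with h | h
    · exact h2r h
    · exact absurd (Int.prime_two.dvd_of_dvd_pow h) (by norm_num)
  have hodd2s : ¬ (2 ∣ s * 3 ^ d) := by
    intro h
    rcases (Int.prime_two.dvd_mul.mp h) with h | h
    · exact h2s h
    · exact absurd (Int.prime_two.dvd_of_dvd_pow h) (by norm_num)
  have heq' : (r * 3 ^ b) * 2 ^ a = (s * 3 ^ d) * 2 ^ c := by
    calc (r * 3 ^ b) * 2 ^ a = r * 2 ^ a * 3 ^ b := by ring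
      _ = s * 2 ^ c * 3 ^ d := heq
      _ = (s * 3 ^ d) * 2 ^ c := by ring
  have hac : a = c := by
    rcases Nat.lt_trichotomy a c with h | h | h
    · exact absurd (key2 a c _ _ h heq' hodd2r) (by simp)
    · exact h
    · exact absurd (key2 c a _ _ h heq'.symm hodd2s) (by simp)
  subst hac
  have heq3 : r * 3 ^ b = s * 3 ^ d := by
    have h2 : (2:Int) ^ a ≠ 0 := by positivity
    exact mul_right_cancel₀ h2 heq'
  have hbd : b = d := by
    rcases Nat.lt_trichotomy b d with h | h | h
    · exact absurd (key3 b d _ _ h heq3 h3r) (by simp)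
    · exact h
    · exact absurd (key3 d b _ _ h heq3.symm h3s) (by simp)
  subst hbd
  have h3 : (3:Int) ^ b ≠ 0 := by positivity
  exact ⟨rfl, rfl, mul_right_cancel₀ h3 heq3⟩

-- closed form of solve_alt given a decomposition
theorem solve_alt_core (n : Int) (a b : Nat) (r : Int) (hn : n ≠ 0)
    (hd : n = r * 2 ^ a * 3 ^ b) (h2 : ¬ (2 ∣ r)) (h3 : ¬ (3 ∣ r)) :
    solve_alt n = if r = 1 ∧ a ≤ b then 2 * (b : Int) - (a : Int) else -1 := by
  obtain ⟨a', ha1, h2', h2d⟩ := stripLoop_char 2 (by norm_num) n.natAbs n hn le_rfl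
  set m := (stripLoop 2 n.natAbs n 0).1 with hm
  have hmne : m ≠ 0 := by rintro h0; rw [h0] at h2'; simp at h2'; exact hn h2'
  have hmlen : m.natAbs ≤ n.natAbs := by
    have hdd : m ∣ n := ⟨2 ^ a', h2'⟩
    exact Nat.le_of_dvd (by omega) (Int.natAbs_dvd_natAbs.mpr hdd)
  obtain ⟨b', hb1, h3', h3d⟩ := stripLoop_char 3 (by norm_num) n.natAbs m hmne hmlen
  set s := (stripLoop 3 n.natAbs m 0).1 with hs
  have h2s : ¬ (2 ∣ s) := by
    intro hdvd
    apply h2d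
    rw [h3']
    exact dvd_mul_of_dvd_left hdvd _
  have heq : r * 2 ^ a * 3 ^ b = s * 2 ^ a' * 3 ^ b' := by
    rw [← hd, h2', h3']; ring
  obtain ⟨haa, hbb, hrs⟩ := decomp_unique a b a' b' r s heq h2 h3 h2s h3d
  subst haa; subst hbb
  simp only [solve_alt]
  rw [← hm, ← hs, ha1, hb1]
  simp only
  by_cases hcond : r = 1 ∧ a ≤ b
  · rw [if_neg, if_pos hcond]
    push_neg
    exact ⟨by rw [← hrs, hcond.1], by exact_mod_cast hcond.2⟩
  · rw [if_pos, if_neg hcond]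
    by_cases hr1 : s = 1
    · right
      have : ¬ a ≤ b := fun h => hcond ⟨hrs.trans hr1, h⟩
      exact_mod_cast by omega
    · left; exact hr1

-- main invariant for A's loop
theorem solveLoop_eq : ∀ (N : Nat) (n : Int), n.natAbs ≤ N → n ≠ 0 →
    ∀ (f : Nat), 2 * n.natAbs + 2 ≤ f → ∀ (m : Int),
    solveLoop f n m = (if solve_alt n = -1 then -1 else m + solve_alt n) := by
  intro N
  induction N with
  | zero => intro n h hn; omega
  | succ N ih =>
    intro n hN hn f hf m
    obtain ⟨a, b, r, hd, h2r, h3r⟩ := exists_decomp n hn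
    have hcore := solve_alt_core n a b r hn hd h2r h3r
    obtain ⟨f', rfl⟩ : ∃ f', f = f' + 1 := ⟨f - 1, by omega⟩
    by_cases h1 : n = 1
    · subst h1
      have : solve_alt 1 = 0 := by decide
      simp [solveLoop, this]
    · by_cases h3n : (3:Int) ∣ n
      · by_cases h2n : (2:Int) ∣ n
        · -- 6 ∣ n: divide by 6
          have h6 : (6:Int) ∣ n := by
            obtain ⟨x, hx⟩ := h2n; obtain ⟨y, hy⟩ := h3n; omega
          have hmod : PySem.Int.mod n 6 = 0 := (PySem.Int.mod_eq_zero_iff_dvd n 6).mpr h6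
          have hfd : PySem.Int.floordiv n 6 = n / 6 := PySem.Int.floordiv_eq_ediv_of_pos (by norm_num)
          have ha1 : 1 ≤ a := by
            by_contra h
            have ha0 : a = 0 := by omega
            apply h2r
            have h2rb : (2:Int) ∣ r * 3 ^ b := by
              rw [ha0, pow_zero, mul_one] at hd; rwa [hd] at h2n
            rcases Int.prime_two.dvd_mul.mp h2rb with h | h
            · exact h
            · exact absurd (Int.prime_two.dvd_of_dvd_pow h) (by norm_num)
          have hb1 : 1 ≤ b := by
            by_contra h
            have hb0 : b = 0 := by omega
            apply h3r
            have h3ra : (3:Int) ∣ r * 2 ^ a := by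
              rw [hb0, pow_zero, mul_one] at hd; rwa [hd] at h3n
            rcases Int.prime_three.dvd_mul.mp h3ra with h | h
            · exact h
            · exact absurd (Int.prime_three.dvd_of_dvd_pow h) (by norm_num)
          obtain ⟨a', rfl⟩ : ∃ a', a = a' + 1 := ⟨a - 1, by omega⟩
          obtain ⟨b', rfl⟩ : ∃ b', b = b' + 1 := ⟨b - 1, by omega⟩
          have hd6 : n / 6 = r * 2 ^ a' * 3 ^ b' := by
            have hne : n = (r * 2 ^ a' * 3 ^ b') * 6 := by rw [hd]; ring
            rw [hne, Int.mul_ediv_cancel _ (by norm_num)]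
          have hne6 : n / 6 ≠ 0 := by
            rw [hd6]
            intro h0
            rcases mul_eq_zero.mp h0 with h0 | h0
            · rcases mul_eq_zero.mp h0 with h0 | h0
              · exact h2r (h0 ▸ dvd_zero 2)
              · exact absurd h0 (by positivity)
            · exact absurd h0 (by positivity)
          have hlt : (n / 6).natAbs < n.natAbs := by
            obtain ⟨t, rfl⟩ := h6
            rw [Int.mul_ediv_cancel_left _ (by norm_num : (6:Int) ≠ 0)]
            have : t ≠ 0 := by rintro rfl; simp at hn
            have : (6 * t).natAbs = 6 * t.natAbs := by
              rw [Int.natAbs_mul]; rfl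
            omega
          have hcore6 := solve_alt_core (n / 6) a' b' r hne6 hd6 h2r h3r
          simp only [solveLoop, if_neg h1, hmod, hfd]
          rw [ih (n / 6) (by omega) hne6 f' (by omega) (m + 1)]
          rw [hcore, hcore6]
          push_cast
          split_ifs <;> omega
        · -- n odd, 3 ∣ n: multiply by 2 then divide by 6 (two steps), recurse on n / 3
          have h6n : ¬ (6:Int) ∣ n := fun h => h2n (dvd_trans (by norm_num) h)
          have hmodn : PySem.Int.mod n 6 ≠ 0 := fun h => h6n ((PySem.Int.mod_eq_zero_iff_dvd n 6).mp h)
          have h62 : (6:Int) ∣ n * 2 := by obtain ⟨t, rfl⟩ := h3n; exact ⟨t, by ring⟩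
          have hmod2 : PySem.Int.mod (n * 2) 6 = 0 := (PySem.Int.mod_eq_zero_iff_dvd _ 6).mpr h62
          have h2ne1 : n * 2 ≠ 1 := by
            intro h; omega
          have hfd : PySem.Int.floordiv (n * 2) 6 = n / 3 := by
            rw [PySem.Int.floordiv_eq_ediv_of_pos (by norm_num)]
            obtain ⟨t, rfl⟩ := h3n
            rw [show (3:Int) * t * 2 = t * 6 by ring, Int.mul_ediv_cancel _ (by norm_num),
               Int.mul_ediv_cancel_left _ (by norm_num : (3:Int) ≠ 0)]
          have ha0 : a = 0 := by
            by_contra h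
            apply h2n
            rw [hd, show a = (a - 1) + 1 by omega]
            exact ⟨r * 2 ^ (a - 1) * 3 ^ b, by ring⟩
          have hb1 : 1 ≤ b := by
            by_contra h
            have hb0 : b = 0 := by omega
            apply h3r
            have h3ra : (3:Int) ∣ r * 2 ^ a := by
              rw [hb0, pow_zero, mul_one] at hd; rwa [hd] at h3n
            rcases Int.prime_three.dvd_mul.mp h3ra with h | h
            · exact h
            · exact absurd (Int.prime_three.dvd_of_dvd_pow h) (by norm_num)
          obtain ⟨b', rfl⟩ : ∃ b', b = b' + 1 := ⟨b - 1, by omega⟩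
          subst ha0
          have hd3 : n / 3 = r * 2 ^ 0 * 3 ^ b' := by
            have hne : n = (r * 2 ^ 0 * 3 ^ b') * 3 := by rw [hd]; ring
            rw [hne, Int.mul_ediv_cancel _ (by norm_num)]
          have hne3 : n / 3 ≠ 0 := by
            rw [hd3]
            intro h0
            rcases mul_eq_zero.mp h0 with h0 | h0
            · rcases mul_eq_zero.mp h0 with h0 | h0
              · exact h2r (h0 ▸ dvd_zero 2)
              · norm_num at h0
            · exact absurd h0 (by positivity)
          have habs : 3 ≤ n.natAbs := by
            obtain ⟨t, rfl⟩ := h3n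
            have : t ≠ 0 := by rintro rfl; simp at hn
            have : (3 * t).natAbs = 3 * t.natAbs := by rw [Int.natAbs_mul]; rfl
            omega
          have hlt : (n / 3).natAbs < n.natAbs := by
            obtain ⟨t, rfl⟩ := h3n
            rw [Int.mul_ediv_cancel_left _ (by norm_num : (3:Int) ≠ 0)]
            have : t ≠ 0 := by rintro rfl; simp at hn
            have : (3 * t).natAbs = 3 * t.natAbs := by rw [Int.natAbs_mul]; rfl
            omega
          have hn3abs : (n / 3).natAbs * 3 = n.natAbs := by
            obtain ⟨t, rfl⟩ := h3n
            rw [Int.mul_ediv_cancel_left _ (by norm_num : (3:Int) ≠ 0)]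
            have : (3 * t).natAbs = 3 * t.natAbs := by rw [Int.natAbs_mul]; rfl
            omega
          obtain ⟨f'', rfl⟩ : ∃ f'', f' = f'' + 1 := ⟨f' - 1, by omega⟩
          have hcore3 := solve_alt_core (n / 3) 0 b' r hne3 hd3 h2r h3r
          simp only [solveLoop, if_neg h1, if_neg hmodn, hmod2, if_neg h2ne1, hfd]
          rw [ih (n / 3) (by omega) hne3 f'' (by omega) (m + 1 + 1)]
          rw [hcore, hcore3]
          push_cast
          split_ifs <;> first | omega | tauto
      · -- 3 ∤ n: break, result -1; show solve_alt n = -1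
        have h6n : ¬ (6:Int) ∣ n := fun h => h3n (dvd_trans (by norm_num) h)
        have hmodn : PySem.Int.mod n 6 ≠ 0 := fun h => h6n ((PySem.Int.mod_eq_zero_iff_dvd n 6).mp h)
        have h62 : ¬ (6:Int) ∣ n * 2 := by
          intro h
          apply h3n
          have : (3:Int) ∣ n * 2 := dvd_trans (by norm_num) h
          rcases Int.prime_three.dvd_mul.mp this with h' | h'
          · exact h'
          · norm_num at h'
        have hmod2 : PySem.Int.mod (n * 2) 6 ≠ 0 := fun h => h62 ((PySem.Int.mod_eq_zero_iff_dvd _ 6).mp h)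
        have hb0 : b = 0 := by
          by_contra h
          apply h3n
          rw [hd, show b = (b - 1) + 1 by omega]
          exact ⟨r * 2 ^ a * 3 ^ (b - 1), by ring⟩
        have halt : solve_alt n = -1 := by
          rw [hcore, hb0]
          by_cases hcond : r = 1 ∧ a ≤ 0
          · exfalso
            apply h1
            rw [hd, hcond.1, hb0, show a = 0 by omega]; ring
          · rw [if_neg hcond]
        rw [halt]
        simp only [solveLoop, if_neg h1]
        rw [if_neg hmodn, if_neg hmod2]
        simp

-- ===== VERDICT (by name: the statement is the Claim_ definition above) =====
theorem solve_spec : Claim_equal_solve := by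
  intro n _ hpre
  unfold Spec_solve solve
  by_cases h1 : n = 1
  · subst h1; decide
  · rw [if_neg h1]
    rw [solveLoop_eq n.natAbs n le_rfl hpre _ le_rfl 0]
    by_cases h : solve_alt n = -1
    · rw [if_pos h, h]
    · rw [if_neg h]; ring
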